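-- pv_equiv track=rewrite | github.com/Kawser-nerd/CLCDSA | Source Codes/AtCoder/abc043/B/4886071.py | unhappy_hacking
-- ===== SOURCE A (Python) =====
-- def unhappy_hacking(s: str) -> str:
--     display = ''
--
--     for key in s:
--         if key == '0':
--             display += '0'
--         elif key == '1':
--             display += '1'
--         else:  # Backspace
--             display = display[:-1]
--
--     return display
-- ===== SOURCE B (Python) =====
-- def unhappy_hacking(s: str) -> str:
--     skip = 0
--     kept = []
--     for key in reversed(s):
--         if key == '0' or key == '1':
--             if skip > 0:
--                 skip -= 1
--             else:
--                 kept.append(key)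
--         else:  # Backspace: cancels one later-typed char
--             skip += 1
--     kept.reverse()
--     return ''.join(kept)
-- ===== Notes on version B (the rewrite author's own statement) =====
-- stated objective: alternative
-- what changed: B scans the keys right-to-left keeping a counter of pending backspaces and a list of kept characters (reversed at the end), instead of maintaining the live display string and truncating it on each backspace.
import Mathlib
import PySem

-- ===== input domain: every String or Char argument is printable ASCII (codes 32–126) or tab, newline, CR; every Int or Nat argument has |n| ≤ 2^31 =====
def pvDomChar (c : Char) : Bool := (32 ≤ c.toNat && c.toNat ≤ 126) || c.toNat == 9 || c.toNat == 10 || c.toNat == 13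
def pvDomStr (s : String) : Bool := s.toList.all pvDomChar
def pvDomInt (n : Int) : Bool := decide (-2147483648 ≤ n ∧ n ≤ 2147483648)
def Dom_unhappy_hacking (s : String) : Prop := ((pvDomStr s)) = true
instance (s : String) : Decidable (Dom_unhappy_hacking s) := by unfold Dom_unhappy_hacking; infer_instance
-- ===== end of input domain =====

-- B replaces A's live-display string (truncated on each backspace) by a right-to-left scan with
-- a pending-backspace counter; equal return value on every input (alternative decomposition).

-- ===== PORT A =====
-- loop body of A: '0'/'1' append to the display, anything else is display[:-1]
def uhAStep (display : List Char) (key : Char) : List Char :=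
  if key = '0' then display ++ ['0']
  else if key = '1' then display ++ ['1']
  else PySem.List.slice display none (some (-1))   -- display[:-1]

def unhappy_hacking (s : String) : String :=
  String.ofList (s.toList.foldl uhAStep [])

-- ===== PORT B =====
-- loop body of B: state = (skip counter, kept chars so far, in scan order)
def uhBStep (st : Nat × List Char) (key : Char) : Nat × List Char :=
  if key = '0' ∨ key = '1' then
    if st.1 > 0 then (st.1 - 1, st.2)
    else (st.1, st.2 ++ [key])
  else
    (st.1 + 1, st.2)

def unhappy_hacking_alt (s : String) : String :=
  String.ofList ((s.toList.reverse.foldl uhBStep (0, [])).2.reverse)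

-- ===== PRECONDITION & SPEC =====
def Spec_unhappy_hacking (s : String) (out : String) : Prop := out = unhappy_hacking_alt s
instance (s : String) (out : String) : Decidable (Spec_unhappy_hacking s out) := by unfold Spec_unhappy_hacking; infer_instance

-- ===== CLAIM (what is proved, stated in full; the proofs are below) =====
def Claim_equal_unhappy_hacking : Prop := ∀ (s : String), Dom_unhappy_hacking s → Spec_unhappy_hacking s (unhappy_hacking s)

-- ===== LEMMAS AND PROOFS =====

-- Invariant: A's left fold from any display d equals d with (skip) chars dropped from its end,
-- followed by the kept chars of B's right-to-left scan (collected reversed).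
lemma uh_invariant (l : List Char) (d : List Char) :
    l.foldl uhAStep d =
      d.take (d.length - (l.foldr (fun c st => uhBStep st c) (0, [])).1)
        ++ (l.foldr (fun c st => uhBStep st c) (0, [])).2.reverse := by
  induction l generalizing d with
  | nil => simp
  | cons c rest ih =>
    simp only [List.foldl_cons, List.foldr_cons]
    rw [ih]
    set st := rest.foldr (fun c st => uhBStep st c) (0, ([] : List Char)) with hst
    by_cases h01 : c = '0' ∨ c = '1'
    · have hA : uhAStep d c = d ++ [c] := by
        rcases h01 with h | h <;> simp [uhAStep, h]
      rw [hA]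
      by_cases hk : st.1 > 0
      · have hB : uhBStep st c = (st.1 - 1, st.2) := by
          simp [uhBStep, h01, hk]
        rw [hB]
        have hle : d.length + 1 - st.1 ≤ d.length := by omega
        rw [List.take_append]
        simp only [List.length_append, List.length_cons, List.length_nil]
        have : d.length + 1 - st.1 - d.length = 0 := by omega
        simp [this]
        congr 2
        omega
      · have hk0 : st.1 = 0 := by omega
        have hB : uhBStep st c = (st.1, st.2 ++ [c]) := by
          simp [uhBStep, h01, hk]
        rw [hB]
        have htk : List.take (d.length + 1) (d ++ [c]) = d ++ [c] :=
          List.take_of_length_le (by simp)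
        simp [hk0, htk]
    · have hA : uhAStep d c = d.dropLast := by
        push Not at h01
        simp [uhAStep, h01.1, h01.2, PySem.List.slice_to_neg_one]
      have hB : uhBStep st c = (st.1 + 1, st.2) := by
        simp [uhBStep, h01]
      rw [hA, hB]
      simp only [List.dropLast_eq_take, List.take_take, List.length_take]
      congr 2
      omega

-- ===== VERDICT (by name: the statement is the Claim_ definition above) =====
theorem unhappy_hacking_spec : Claim_equal_unhappy_hacking := by
  intro s _
  show unhappy_hacking s = unhappy_hacking_alt s
  unfold unhappy_hacking unhappy_hacking_alt
  rw [List.foldl_reverse, uh_invariant]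
  simp
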